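-- pv_equiv track=rewrite | github.com/shichunbo2004/NJUPT- | B2 游览校园2_B22040220.py | find_disjoint_paths
-- ===== SOURCE A (Python) =====
-- def find_disjoint_paths(graph, start1, end1, start2, end2, required_nodes):
--     """
--     在图中找到两条不相交的路径，每条路径都从指定的起点到终点，并且两条路径一起覆盖所有必需的节点。
--
--     :param graph: 图的邻接表表示
--     :param start1: 第一条路径的起点
--     :param end1: 第一条路径的终点
--     :param start2: 第二条路径的起点
--     :param end2: 第二条路径的终点
--     :param required_nodes: 必须访问的节点集合
--     :return: 生成所有不相交的路径对
--     """
--     def find_all_paths(graph, start, end, visited=None, path=None):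
--         """
--         在图中找到从起点到终点的所有路径，避免重复访问节点。
--
--         :param graph: 图的邻接表表示
--         :param start: 起点
--         :param end: 终点
--         :param visited: 已访问的节点集合
--         :param path: 当前路径
--         :yield: 生成所有路径
--         """
--         if visited is None:
--             visited = set()
--         if path is None:
--             path = []
--
--         visited.add(start)
--         path.append(start)
--
--         if start == end:
--             yield path[:]  # 如果到达终点，生成当前路径
--         else:
--             for neighbor in graph.get(start, []):  # 遍历邻居节点
--                 if neighbor not in visited:
--                     yield from find_all_paths(graph, neighbor, end, visited, path)  # 递归查找路径
--
--         visited.remove(start)  # 回溯，移除当前节点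
--         path.pop()
--
--     # 为第一条路线找到所有可能的路径
--     all_first_paths = list(find_all_paths(graph, start1, end1))
--
--     for first_path in all_first_paths:
--         # 计算剩余需要访问的节点，并构建排除第一条路径节点的子图
--         first_path_set = set(first_path)
--         remaining_required_nodes = required_nodes - first_path_set
--         remaining_graph = {node: [neighbor for neighbor in neighbors if neighbor not in first_path_set]
--                            for node, neighbors in graph.items() if node not in first_path_set}
--
--         # 在剩余图中为第二条路线找到所有可能的路径
--         all_second_paths = list(find_all_paths(remaining_graph, start2, end2))
--
--         for second_path in all_second_paths:
--             # 检查第二条路径是否覆盖了所有剩余需要访问的节点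
--             if remaining_required_nodes.issubset(second_path):
--                 yield first_path, second_path
-- ===== SOURCE B (Python) =====
-- def find_disjoint_paths(graph, start1, end1, start2, end2, required_nodes):
--     def iter_paths(start, end, excluded):
--         # iterative DFS with an explicit stack; neighbors filtered through the
--         # exclusion set instead of building a pruned copy of the graph
--         found = []
--         stack = [(start, [start])]
--         while stack:
--             node, path = stack.pop()
--             if node == end:
--                 found.append(path)
--                 continue
--             if node in excluded:
--                 continue
--             for nb in reversed(graph.get(node, [])):
--                 if nb not in excluded and nb not in path:
--                     stack.append((nb, path + [nb]))
--         return found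
--
--     result = []
--     for first in iter_paths(start1, end1, frozenset()):
--         for second in iter_paths(start2, end2, frozenset(first)):
--             if all(n in first or n in second for n in required_nodes):
--                 result.append((first, second))
--     return result
-- ===== Notes on version B (the rewrite author's own statement) =====
-- stated objective: alternative
-- what changed: The recursive backtracking generator find_all_paths is replaced by an iterative DFS with an explicit stack (reverse-order pushes preserve the yield order), and the per-first-path remaining_graph dict, set difference and issubset test are replaced by an exclusion-set neighbor filter plus a direct all(n in first or n in second) coverage check.
import Mathlib
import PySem

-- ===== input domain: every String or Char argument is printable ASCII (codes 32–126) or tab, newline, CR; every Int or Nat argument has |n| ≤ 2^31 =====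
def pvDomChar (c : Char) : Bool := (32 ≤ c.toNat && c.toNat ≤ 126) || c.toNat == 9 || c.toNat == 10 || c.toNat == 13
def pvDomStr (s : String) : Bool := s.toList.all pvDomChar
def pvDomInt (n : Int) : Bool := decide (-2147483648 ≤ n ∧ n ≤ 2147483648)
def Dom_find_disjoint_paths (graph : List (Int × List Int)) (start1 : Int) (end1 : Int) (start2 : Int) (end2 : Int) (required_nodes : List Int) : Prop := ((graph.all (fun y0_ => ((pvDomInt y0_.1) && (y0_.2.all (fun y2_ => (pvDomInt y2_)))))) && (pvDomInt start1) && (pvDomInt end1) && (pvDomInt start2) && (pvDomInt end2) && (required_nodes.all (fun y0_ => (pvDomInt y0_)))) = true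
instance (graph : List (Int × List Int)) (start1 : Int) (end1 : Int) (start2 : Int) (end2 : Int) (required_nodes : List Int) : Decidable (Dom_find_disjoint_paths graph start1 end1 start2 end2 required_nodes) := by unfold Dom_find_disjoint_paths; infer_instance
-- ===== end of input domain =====

-- B replaces the recursive backtracking generator by an explicit-stack DFS and replaces the
-- pruned remaining_graph dict / set-difference / issubset bookkeeping by an exclusion-set
-- neighbor filter and a direct coverage test; same values in the same order (objective: alternative).

-- ===== shared infrastructure (graph.get and termination measures; cited by decreasing_by) =====

-- graph.get(k, []) on the association list (first match)
def pvDictGet (graph : List (Int × List Int)) (k : Int) : List Int :=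
  match graph.find? (fun kv => kv.1 == k) with
  | some kv => kv.2
  | none => []

def pvUniv (graph : List (Int × List Int)) : List Int :=
  graph.map Prod.fst ++ graph.flatMap Prod.snd

theorem pvDictGet_subset_univ {graph : List (Int × List Int)} {k nb : Int}
    (h : nb ∈ pvDictGet graph k) : nb ∈ pvUniv graph := by
  unfold pvDictGet at h
  rcases hf : graph.find? (fun kv => kv.1 == k) with _ | kv
  · rw [hf] at h; simp at h
  · rw [hf] at h
    have hmem : kv ∈ graph := List.mem_of_find?_eq_some hf
    unfold pvUniv
    exact List.mem_append_right _ (List.mem_flatMap.mpr ⟨kv, hmem, h⟩)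

theorem pv_filter_le {α : Type} (l : List α) (p q : α → Bool)
    (himp : ∀ x, q x = true → p x = true) :
    (l.filter q).length ≤ (l.filter p).length := by
  induction l with
  | nil => simp
  | cons b tl ih =>
    cases hq : q b with
    | true => have hp := himp b hq; simp [hq, hp]; omega
    | false => cases hp : p b <;> simp [hq, hp] <;> omega

theorem pv_filter_lt {α : Type} (l : List α) (p q : α → Bool)
    (himp : ∀ x, q x = true → p x = true) (a : α) (ha : a ∈ l)
    (hp : p a = true) (hq : q a = false) :
    (l.filter q).length < (l.filter p).length := by
  induction l with
  | nil => simp at ha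
  | cons b tl ih =>
    rcases List.mem_cons.mp ha with rfl | hatl
    · have hle := pv_filter_le tl p q himp
      simp [hp, hq]; omega
    · cases hqb : q b with
      | true =>
        have hpb := himp b hqb
        have := ih hatl
        simp [hqb, hpb]; omega
      | false =>
        have := ih hatl
        cases hpb : p b <;> simp [hqb, hpb] <;> omega

-- number of univ nodes not yet on the path / not visited
def pvFree (graph : List (Int × List Int)) (p : List Int) : Nat :=
  ((pvUniv graph).filter (fun x => decide (x ∉ p))).length

def pvDeg (graph : List (Int × List Int)) : Nat :=
  graph.foldr (fun kv m => max kv.2.length m) 0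

def pvW (graph : List (Int × List Int)) (p : List Int) : Nat :=
  (pvDeg graph + 2) ^ pvFree graph p

theorem pvW_pos (graph : List (Int × List Int)) (p : List Int) : 0 < pvW graph p :=
  pow_pos (by omega) _

theorem pvDeg_cons (b : Int × List Int) (tl : List (Int × List Int)) :
    pvDeg (b :: tl) = max b.2.length (pvDeg tl) := rfl

theorem pvDeg_bound {graph : List (Int × List Int)} {kv : Int × List Int}
    (h : kv ∈ graph) : kv.2.length ≤ pvDeg graph := by
  induction graph with
  | nil => simp at h
  | cons b tl ih =>
    rw [pvDeg_cons]
    rcases List.mem_cons.mp h with rfl | htl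
    · exact le_max_left _ _
    · exact le_trans (ih htl) (le_max_right _ _)

theorem pvDictGet_len {graph : List (Int × List Int)} {k : Int} :
    (pvDictGet graph k).length ≤ pvDeg graph := by
  unfold pvDictGet
  rcases hf : graph.find? (fun kv => kv.1 == k) with _ | kv
  · simp [hf]
  · simp only [hf]
    exact pvDeg_bound (List.mem_of_find?_eq_some hf)

-- ===== PORT A =====
-- find_all_paths: the recursive backtracking generator (visited/path restored on return,
-- so the pure recursion below passes the extended visited/path to each recursive call)
def find_all_paths (graph : List (Int × List Int)) (start end_ : Int)
    (visited : List Int) (path : List Int) : List (List Int) :=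
  let visited' := PySem.Set.add visited start
  let path' := path ++ [start]
  if start = end_ then [path']
  else (pvDictGet graph start).attach.flatMap (fun nbh =>
    if _h : nbh.1 ∈ visited' then [] else find_all_paths graph nbh.1 end_ visited' path')
termination_by ((pvUniv graph).filter (fun x => decide (x ∉ PySem.Set.add visited start))).length
decreasing_by
  exact pv_filter_lt (pvUniv graph) _ _
    (fun x hx => by
      simp only [decide_eq_true_eq] at *
      intro hmem
      exact hx (by simp [PySem.Set.mem_add, hmem]))
    nbh.1 (pvDictGet_subset_univ nbh.2)
    (by simp only [visited'] at _h; simp only [decide_eq_true_eq]; simpa [PySem.Set.mem_add] using _h)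
    (by simp [PySem.Set.mem_add])

def find_disjoint_paths (graph : List (Int × List Int)) (start1 : Int) (end1 : Int)
    (start2 : Int) (end2 : Int) (required_nodes : List Int) : List (List Int × List Int) :=
  let all_first_paths := find_all_paths graph start1 end1 [] []
  all_first_paths.flatMap (fun first_path =>
    let first_path_set := PySem.Set.ofList first_path
    let remaining_required_nodes := PySem.Set.diff required_nodes first_path_set
    let remaining_graph :=
      (graph.filter (fun kv => decide (kv.1 ∉ first_path_set))).map
        (fun kv => (kv.1, kv.2.filter (fun nb => decide (nb ∉ first_path_set))))
    let all_second_paths := find_all_paths remaining_graph start2 end2 [] []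
    all_second_paths.flatMap (fun second_path =>
      if PySem.Set.issubset remaining_required_nodes second_path
      then [(first_path, second_path)] else []))

-- ===== PORT B =====
-- neighbors(node) of Source B's iter_paths: [] for an excluded node, else graph.get filtered
def fdpNeighbors (graph : List (Int × List Int)) (excl : List Int) (node : Int) : List Int :=
  if node ∈ excl then [] else (pvDictGet graph node).filter (fun nb => decide (nb ∉ excl))

theorem pv_children_lt (graph : List (Int × List Int)) (excl : List Int)
    (node : Int) (path : List Int) :
    ((((fdpNeighbors graph excl node).filter (fun nb => decide (nb ∉ path))).map
       (fun nb => pvW graph (path ++ [nb]))).sum) < pvW graph path := by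
  set fs := (fdpNeighbors graph excl node).filter (fun nb => decide (nb ∉ path)) with hfs
  have hW0 : 0 < pvW graph path := pow_pos (by omega) _
  by_cases hne : fs = []
  · simp [hne, hW0]
  · obtain ⟨nb0, hnb0⟩ := List.exists_mem_of_ne_nil fs hne
    have hmemU : ∀ nb ∈ fs, nb ∈ pvUniv graph ∧ nb ∉ path := by
      intro nb hnb
      rw [hfs] at hnb
      have h1 := List.mem_filter.mp hnb
      have h2 : nb ∈ pvDictGet graph node := by
        have := h1.1
        unfold fdpNeighbors at this
        split at this
        · simp at this
        · exact (List.mem_filter.mp this).1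
      exact ⟨pvDictGet_subset_univ h2, by simpa using h1.2⟩
    have hf1 : 1 ≤ pvFree graph path := by
      have := hmemU nb0 hnb0
      have : nb0 ∈ (pvUniv graph).filter (fun x => decide (x ∉ path)) :=
        List.mem_filter.mpr ⟨this.1, by simpa using this.2⟩
      have := List.length_pos_of_mem this
      unfold pvFree; omega
    have hlen : fs.length ≤ pvDeg graph := by
      have h1 : fs.length ≤ (fdpNeighbors graph excl node).length := by
        rw [hfs]; exact List.length_filter_le _ _
      have h2 : (fdpNeighbors graph excl node).length ≤ (pvDictGet graph node).length := by
        unfold fdpNeighbors; split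
        · simp
        · exact List.length_filter_le _ _
      exact le_trans h1 (le_trans h2 pvDictGet_len)
    have hbound : ∀ x ∈ fs.map (fun nb => pvW graph (path ++ [nb])),
        x ≤ (pvDeg graph + 2) ^ (pvFree graph path - 1) := by
      intro x hx
      obtain ⟨nb, hnb, rfl⟩ := List.mem_map.mp hx
      have hm := hmemU nb hnb
      have hlt : pvFree graph (path ++ [nb]) < pvFree graph path := by
        unfold pvFree
        exact pv_filter_lt _ _ _
          (fun y hy => by simp at *; tauto)
          nb hm.1 (by simpa using hm.2) (by simp)
      unfold pvW
      exact Nat.pow_le_pow_right (by omega) (by omega)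
    have hsum : (fs.map (fun nb => pvW graph (path ++ [nb]))).sum
        ≤ fs.length * (pvDeg graph + 2) ^ (pvFree graph path - 1) := by
      have := List.sum_le_card_nsmul (fs.map (fun nb => pvW graph (path ++ [nb])))
        ((pvDeg graph + 2) ^ (pvFree graph path - 1)) hbound
      simpa [smul_eq_mul] using this
    have hWp : (pvDeg graph + 2) ^ (pvFree graph path - 1) > 0 := pow_pos (by omega) _
    have hfin : fs.length * (pvDeg graph + 2) ^ (pvFree graph path - 1) < pvW graph path := by
      unfold pvW
      calc fs.length * (pvDeg graph + 2) ^ (pvFree graph path - 1)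
          < (pvDeg graph + 2) * (pvDeg graph + 2) ^ (pvFree graph path - 1) := by
            exact (Nat.mul_lt_mul_right hWp).mpr (by omega)
        _ = (pvDeg graph + 2) ^ (pvFree graph path) := by
            rw [← pow_succ']
            congr 1; omega
    omega


-- the while-stack loop of iter_paths; the Python stack keeps its top at the END of the list,
-- here the stack is modeled top-at-HEAD, so the reversed pushes followed by LIFO pops appear
-- as pushing the filtered neighbors in their original order in front of the rest
def iter_paths_loop (graph : List (Int × List Int)) (excl : List Int) (end_ : Int) :
    List (Int × List Int) → List (List Int)
  | [] => []
  | (node, path) :: rest =>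
    if node = end_ then path :: iter_paths_loop graph excl end_ rest
    else iter_paths_loop graph excl end_
      (((fdpNeighbors graph excl node).filter (fun nb => decide (nb ∉ path))).map
        (fun nb => (nb, path ++ [nb])) ++ rest)
termination_by stack => (stack.map (fun e => pvW graph e.2)).sum
decreasing_by
  · simp only [List.map_cons, List.sum_cons]
    have := pvW_pos graph path
    omega
  · simp only [List.map_cons, List.sum_cons, List.map_append, List.sum_append, List.map_map]
    have h := pv_children_lt graph excl node path
    have : (((fdpNeighbors graph excl node).filter (fun nb => decide (nb ∉ path))).map
        ((fun e => pvW graph e.2) ∘ (fun nb => (nb, path ++ [nb])))).sum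
        = ((((fdpNeighbors graph excl node).filter (fun nb => decide (nb ∉ path))).map
       (fun nb => pvW graph (path ++ [nb]))).sum) := rfl
    omega

def find_disjoint_paths_alt (graph : List (Int × List Int)) (start1 : Int) (end1 : Int)
    (start2 : Int) (end2 : Int) (required_nodes : List Int) : List (List Int × List Int) :=
  (iter_paths_loop graph [] end1 [(start1, [start1])]).flatMap (fun first =>
    (iter_paths_loop graph first end2 [(start2, [start2])]).flatMap (fun second =>
      if required_nodes.all (fun n => decide (n ∈ first) || decide (n ∈ second))
      then [(first, second)] else []))

-- ===== PRECONDITION & SPEC =====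
def Spec_find_disjoint_paths (graph : List (Int × List Int)) (start1 : Int) (end1 : Int) (start2 : Int) (end2 : Int) (required_nodes : List Int) (out : List (List Int × List Int)) : Prop := out = find_disjoint_paths_alt graph start1 end1 start2 end2 required_nodes
instance (graph : List (Int × List Int)) (start1 : Int) (end1 : Int) (start2 : Int) (end2 : Int) (required_nodes : List Int) (out : List (List Int × List Int)) : Decidable (Spec_find_disjoint_paths graph start1 end1 start2 end2 required_nodes out) := by unfold Spec_find_disjoint_paths; infer_instance

-- ===== CLAIM (what is proved, stated in full; the proofs are below) =====
def Claim_equal_find_disjoint_paths : Prop := ∀ (graph : List (Int × List Int)) (start1 : Int) (end1 : Int) (start2 : Int) (end2 : Int) (required_nodes : List Int), Dom_find_disjoint_paths graph start1 end1 start2 end2 required_nodes → Spec_find_disjoint_paths graph start1 end1 start2 end2 required_nodes (find_disjoint_paths graph start1 end1 start2 end2 required_nodes)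

-- ===== LEMMAS AND PROOFS =====

-- the stack loop processes one stack entry exactly as one recursive find_all_paths call
theorem pv_loop_eq_dfs (gA gB : List (Int × List Int)) (excl : List Int) (e : Int)
    (hnb : ∀ node, fdpNeighbors gB excl node = pvDictGet gA node) :
    ∀ (K : Nat) (n : Int) (visited p : List Int) (rest : List (Int × List Int)),
      ((pvUniv gA).filter (fun x => decide (x ∉ PySem.Set.add visited n))).length ≤ K →
      (∀ x : Int, x ∈ visited ↔ x ∈ p) →
      iter_paths_loop gB excl e ((n, p ++ [n]) :: rest)
        = find_all_paths gA n e visited p ++ iter_paths_loop gB excl e rest := by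
  intro K
  induction K using Nat.strong_induction_on with
  | _ K ih =>
    intro n visited p rest hK hinv
    rw [iter_paths_loop, find_all_paths]
    by_cases he : n = e
    · simp [he]
    · rw [if_neg he, if_neg he]
      rw [hnb n]
      -- reduce A's attach-flatMap with a dependent if to a plain flatMap
      have hattach : ∀ (v pp : List Int),
          ((pvDictGet gA n).attach.flatMap (fun nbh =>
            if _h : nbh.1 ∈ v then [] else find_all_paths gA nbh.1 e v pp))
          = (pvDictGet gA n).flatMap (fun nb =>
            if nb ∈ v then [] else find_all_paths gA nb e v pp) := by
        intro v pp
        simp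
      rw [hattach]
      have hmemU : ∀ nb ∈ pvDictGet gA n, nb ∈ pvUniv gA := fun nb h => pvDictGet_subset_univ h
      -- inner induction over the neighbor list
      have inner : ∀ (ns : List Int) (rest : List (Int × List Int)),
          (∀ nb ∈ ns, nb ∈ pvUniv gA) →
          iter_paths_loop gB excl e
            ((ns.filter (fun nb => decide (nb ∉ p ++ [n]))).map
              (fun nb => (nb, (p ++ [n]) ++ [nb])) ++ rest)
          = ns.flatMap (fun nb =>
              if nb ∈ PySem.Set.add visited n then []
              else find_all_paths gA nb e (PySem.Set.add visited n) (p ++ [n]))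
            ++ iter_paths_loop gB excl e rest := by
        intro ns
        induction ns with
        | nil => intro rest _; simp
        | cons nb tl ihns =>
          intro rest hU
          by_cases hv : nb ∈ PySem.Set.add visited n
          · have hp' : nb ∈ p ++ [n] := by
              rcases (PySem.Set.mem_add _ _ _).mp hv with h1 | h1
              · exact List.mem_append_left _ ((hinv nb).mp h1)
              · simp [h1]
            rw [List.filter_cons_of_neg (by simp only [decide_eq_true_eq]; exact not_not_intro hp')]
            rw [List.flatMap_cons, if_pos hv, List.nil_append]
            exact ihns rest (fun x hx => hU x (List.mem_cons_of_mem _ hx))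
          · have hp' : nb ∉ p ++ [n] := by
              intro hmem
              apply hv
              rcases List.mem_append.mp hmem with h1 | h1
              · exact (PySem.Set.mem_add _ _ _).mpr (Or.inl ((hinv nb).mpr h1))
              · exact (PySem.Set.mem_add _ _ _).mpr (Or.inr (by simpa using h1))
            rw [List.filter_cons_of_pos (by simpa using hp'), List.map_cons, List.cons_append]
            have hmeas : ((pvUniv gA).filter
                (fun x => decide (x ∉ PySem.Set.add (PySem.Set.add visited n) nb))).length
                < ((pvUniv gA).filter (fun x => decide (x ∉ PySem.Set.add visited n))).length := by
              apply pv_filter_lt (pvUniv gA) _ _ ?himp nb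
                (hU nb (List.mem_cons_self)) ?hp ?hq
              case himp =>
                intro x hx
                simp only [decide_eq_true_eq] at *
                intro hmem
                exact hx ((PySem.Set.mem_add _ _ _).mpr (Or.inl hmem))
              case hp => simpa using hv
              case hq => simp [PySem.Set.mem_add]
            have hrec := ih _ (lt_of_lt_of_le hmeas hK) nb (PySem.Set.add visited n)
              (p ++ [n]) ((tl.filter (fun nb => decide (nb ∉ p ++ [n]))).map
                (fun nb => (nb, (p ++ [n]) ++ [nb])) ++ rest)
              le_rfl
              (by
                intro x
                rw [PySem.Set.mem_add]
                constructor
                · rintro (h1 | h1)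
                  · exact List.mem_append_left _ ((hinv x).mp h1)
                  · simp [h1]
                · intro h1
                  rcases List.mem_append.mp h1 with h2 | h2
                  · exact Or.inl ((hinv x).mpr h2)
                  · exact Or.inr (by simpa using h2))
            rw [hrec]
            rw [ihns rest (fun x hx => hU x (List.mem_cons_of_mem _ hx))]
            rw [List.flatMap_cons, if_neg hv, List.append_assoc]
      exact inner (pvDictGet gA n) rest hmemU

theorem pv_iter_eq_dfs (gA gB : List (Int × List Int)) (excl : List Int) (e s : Int)
    (hnb : ∀ node, fdpNeighbors gB excl node = pvDictGet gA node) :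
    iter_paths_loop gB excl e [(s, [s])] = find_all_paths gA s e [] [] := by
  have h := pv_loop_eq_dfs gA gB excl e hnb
    (((pvUniv gA).filter (fun x => decide (x ∉ PySem.Set.add [] s))).length)
    s [] [] [] le_rfl (by simp)
  simpa [iter_paths_loop] using h

theorem pv_nbs_nil (g : List (Int × List Int)) (node : Int) :
    fdpNeighbors g [] node = pvDictGet g node := by
  simp [fdpNeighbors]

theorem pv_nbs_excl (g : List (Int × List Int)) (first : List Int) (node : Int) :
    fdpNeighbors g first node
      = pvDictGet ((g.filter (fun kv => decide (kv.1 ∉ PySem.Set.ofList first))).map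
          (fun kv => (kv.1, kv.2.filter (fun nb => decide (nb ∉ PySem.Set.ofList first))))) node := by
  by_cases hn : node ∈ first
  · have hf : (((g.filter (fun kv => decide (kv.1 ∉ PySem.Set.ofList first))).map
          (fun kv => (kv.1, kv.2.filter (fun nb => decide (nb ∉ PySem.Set.ofList first))))).find?
          (fun kv => kv.1 == node)) = none := by
      rw [List.find?_eq_none]
      intro kv hkv
      simp only [List.mem_map, List.mem_filter] at hkv
      obtain ⟨kv0, ⟨_, hnot⟩, rfl⟩ := hkv
      simp only [decide_eq_true_eq, PySem.Set.mem_ofList] at hnot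
      simp only [beq_iff_eq]
      rintro rfl
      exact hnot hn
    unfold fdpNeighbors pvDictGet
    rw [if_pos hn, hf]
  · induction g with
    | nil => simp [fdpNeighbors, pvDictGet, hn]
    | cons kv tl ih =>
      by_cases hk : kv.1 ∈ first
      · have h1 : pvDictGet (kv :: tl) node = pvDictGet tl node := by
          unfold pvDictGet
          rw [List.find?_cons_of_neg]
          simp only [beq_iff_eq]; rintro rfl; exact hn hk
        have h2 : (kv :: tl).filter (fun kv => decide (kv.1 ∉ PySem.Set.ofList first))
            = tl.filter (fun kv => decide (kv.1 ∉ PySem.Set.ofList first)) := by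
          rw [List.filter_cons_of_neg]; simp [PySem.Set.mem_ofList, hk]
        simp only [fdpNeighbors, hn, h1, h2] at ih ⊢
        exact ih
      · have h2 : (kv :: tl).filter (fun kv => decide (kv.1 ∉ PySem.Set.ofList first))
            = kv :: tl.filter (fun kv => decide (kv.1 ∉ PySem.Set.ofList first)) := by
          rw [List.filter_cons_of_pos]; simp [PySem.Set.mem_ofList, hk]
        by_cases heq : kv.1 = node
        · have hA : pvDictGet (kv :: tl) node = kv.2 := by
            unfold pvDictGet; rw [List.find?_cons_of_pos]; simp [heq]
          have hB : pvDictGet (((kv :: tl).filter (fun kv => decide (kv.1 ∉ PySem.Set.ofList first))).map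
              (fun kv => (kv.1, kv.2.filter (fun nb => decide (nb ∉ PySem.Set.ofList first))))) node
              = kv.2.filter (fun nb => decide (nb ∉ PySem.Set.ofList first)) := by
            rw [h2]; unfold pvDictGet
            simp only [List.map_cons]
            rw [List.find?_cons_of_pos]
            simp [heq]
          rw [hB]
          simp only [fdpNeighbors, if_neg hn, hA]
          apply List.filter_congr
          intro x _; simp [PySem.Set.mem_ofList]
        · have hA : pvDictGet (kv :: tl) node = pvDictGet tl node := by
            unfold pvDictGet; rw [List.find?_cons_of_neg]; simp [heq]
          have hB : pvDictGet (((kv :: tl).filter (fun kv => decide (kv.1 ∉ PySem.Set.ofList first))).map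
              (fun kv => (kv.1, kv.2.filter (fun nb => decide (nb ∉ PySem.Set.ofList first))))) node
              = pvDictGet ((tl.filter (fun kv => decide (kv.1 ∉ PySem.Set.ofList first))).map
              (fun kv => (kv.1, kv.2.filter (fun nb => decide (nb ∉ PySem.Set.ofList first))))) node := by
            rw [h2]; unfold pvDictGet
            simp only [List.map_cons]
            rw [List.find?_cons_of_neg]
            simp [heq]
          rw [hB]
          simp only [fdpNeighbors, if_neg hn, hA] at ih ⊢
          exact ih


theorem pv_cover_eq (required first second : List Int) :
    PySem.Set.issubset (PySem.Set.diff required (PySem.Set.ofList first)) second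
      = required.all (fun n => decide (n ∈ first) || decide (n ∈ second)) := by
  rw [Bool.eq_iff_iff]
  simp [PySem.Set.issubset, PySem.Set.diff, PySem.Set.contains, PySem.Set.mem_ofList]

-- ===== VERDICT (by name: the statement is the Claim_ definition above) =====
theorem find_disjoint_paths_spec : Claim_equal_find_disjoint_paths := by
  intro graph start1 end1 start2 end2 required_nodes _
  unfold Spec_find_disjoint_paths find_disjoint_paths find_disjoint_paths_alt
  dsimp only
  rw [pv_iter_eq_dfs graph graph [] end1 start1 (pv_nbs_nil graph)]
  refine List.flatMap_congr (fun first _ => ?_)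
  rw [pv_iter_eq_dfs _ graph first end2 start2 (pv_nbs_excl graph first)]
  refine List.flatMap_congr (fun second _ => ?_)
  rw [pv_cover_eq required_nodes first second]
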